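-- pv_equiv track=rewrite | github.com/dandelprado/casmate | data_api.py | list_department_heads
-- ===== SOURCE A (Python) =====
-- from typing import Dict, List, Optional, Tuple
--
-- def list_department_heads(departments: List[Dict]) -> List[Dict]:
--     rows = []
--     for d in departments:
--         head = d.get("department_head") or ""
--         if head:
--             rows.append({"department_id": d.get("department_id"), "department_name": d.get("department_name"), "department_head": head, "dean_flag": d.get("dean_flag") or "N"})
--     rows.sort(key=lambda r: 0 if (r.get("dean_flag") or "N").upper() == "Y" else 1)
--     return rows
-- ===== SOURCE B (Python) =====
-- def list_department_heads(departments):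
--     deans = []
--     others = []
--     for d in departments:
--         head = d.get("department_head") or ""
--         if not head:
--             continue
--         row = {"department_id": d.get("department_id"), "department_name": d.get("department_name"), "department_head": head, "dean_flag": d.get("dean_flag") or "N"}
--         if (d.get("dean_flag") or "N").upper() == "Y":
--             deans.append(row)
--         else:
--             others.append(row)
--     return deans + others
-- ===== Notes on version B (the rewrite author's own statement) =====
-- stated objective: simpler
-- what changed: Replaces the filter-then-stable-sort-on-a-binary-key with a single-pass stable two-bucket partition (deans list and others list, concatenated), removing the sort entirely.
import Mathlib
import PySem

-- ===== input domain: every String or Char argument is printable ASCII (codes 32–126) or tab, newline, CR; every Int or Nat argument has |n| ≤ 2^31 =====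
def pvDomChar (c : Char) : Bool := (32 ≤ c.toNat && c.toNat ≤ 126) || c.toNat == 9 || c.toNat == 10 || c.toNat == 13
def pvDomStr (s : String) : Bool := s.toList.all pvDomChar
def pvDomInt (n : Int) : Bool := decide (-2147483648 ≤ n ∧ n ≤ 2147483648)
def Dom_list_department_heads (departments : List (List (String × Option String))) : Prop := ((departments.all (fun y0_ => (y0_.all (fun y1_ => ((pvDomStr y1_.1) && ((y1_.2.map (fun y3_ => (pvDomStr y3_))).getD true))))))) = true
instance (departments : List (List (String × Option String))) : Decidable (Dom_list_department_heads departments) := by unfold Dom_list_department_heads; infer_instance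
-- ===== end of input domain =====

-- ===== PORT A =====
-- B replaces A's filter-then-stable-sort-on-a-binary-key with a one-pass stable two-bucket partition; same return value.
-- d.get(k) on a dict with Option String values: first match, None when missing
def pvGet (d : List (String × Option String)) (k : String) : Option String :=
  match d.find? (fun p => p.1 == k) with
  | some p => p.2
  | none => none

-- Python 'v or dflt' for v : Option String (truthy = some nonempty string)
def pvOr (v : Option String) (dflt : String) : String :=
  match v with
  | some s => if s = "" then dflt else s
  | none => dflt

-- A's sort key: 0 if (r.get("dean_flag") or "N").upper() == "Y" else 1
def rowKey (r : List (String × Option String)) : Int :=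
  if PySem.Str.upper (pvOr (pvGet r "dean_flag") "N") = "Y" then 0 else 1

def list_department_heads (departments : List (List (String × Option String))) : List (List (String × Option String)) :=
  let rows := departments.foldl (fun rows d =>
    let head := pvOr (pvGet d "department_head") ""
    if head ≠ "" then
      rows ++ [[("department_id", pvGet d "department_id"),
          ("department_name", pvGet d "department_name"),
          ("department_head", some head),
          ("dean_flag", some (pvOr (pvGet d "dean_flag") "N"))]]
    else rows) []
  PySem.List.sorted rows rowKey

-- ===== PORT B =====
def list_department_heads_alt (departments : List (List (String × Option String))) : List (List (String × Option String)) :=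
  let acc := departments.foldl
    (fun (acc : List (List (String × Option String)) × List (List (String × Option String))) d =>
      let head := pvOr (pvGet d "department_head") ""
      if head = "" then acc
      else
        let row := [("department_id", pvGet d "department_id"),
          ("department_name", pvGet d "department_name"),
          ("department_head", some head),
          ("dean_flag", some (pvOr (pvGet d "dean_flag") "N"))]
        if PySem.Str.upper (pvOr (pvGet d "dean_flag") "N") = "Y" then
          (acc.1 ++ [row], acc.2)
        else
          (acc.1, acc.2 ++ [row]))
    ([], [])
  acc.1 ++ acc.2

-- ===== PRECONDITION & SPEC =====
def Spec_list_department_heads (departments : List (List (String × Option String))) (out : List (List (String × Option String))) : Prop := out = list_department_heads_alt departments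
instance (departments : List (List (String × Option String))) (out : List (List (String × Option String))) : Decidable (Spec_list_department_heads departments out) := by unfold Spec_list_department_heads; infer_instance

-- ===== CLAIM (what is proved, stated in full; the proofs are below) =====
def Claim_equal_list_department_heads : Prop := ∀ (departments : List (List (String × Option String))), Dom_list_department_heads departments → Spec_list_department_heads departments (list_department_heads departments)

-- ===== LEMMAS AND PROOFS =====

-- proof-side name for the row dict both ports construct
def mkRow (d : List (String × Option String)) : List (String × Option String) :=
  [("department_id", pvGet d "department_id"),
   ("department_name", pvGet d "department_name"),
   ("department_head", some (pvOr (pvGet d "department_head") "")),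
   ("dean_flag", some (pvOr (pvGet d "dean_flag") "N"))]

def headOK (d : List (String × Option String)) : Bool := pvOr (pvGet d "department_head") "" ≠ ""

def isDean (d : List (String × Option String)) : Bool :=
  PySem.Str.upper (pvOr (pvGet d "dean_flag") "N") = "Y"

lemma pvOr_ne_empty (v : Option String) (dflt : String) (h : dflt ≠ "") : pvOr v dflt ≠ "" := by
  cases v with
  | none => simpa [pvOr] using h
  | some s => by_cases hs : s = "" <;> simp [pvOr, hs, h]

lemma rowKey_mkRow (d : List (String × Option String)) :
    rowKey (mkRow d) = if isDean d then 0 else 1 := by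
  have hne : pvOr (pvGet d "dean_flag") "N" ≠ "" := pvOr_ne_empty _ _ (by decide)
  have h1 : pvGet (mkRow d) "dean_flag" = some (pvOr (pvGet d "dean_flag") "N") := by
    simp [pvGet, mkRow, List.find?]
  unfold rowKey isDean
  rw [h1]
  generalize hv : pvOr (pvGet d "dean_flag") "N" = v at hne ⊢
  simp [pvOr, hne]

lemma rowKey_binary (d : List (String × Option String)) :
    rowKey (mkRow d) = 0 ∨ rowKey (mkRow d) = 1 := by
  rw [rowKey_mkRow]; by_cases h : isDean d <;> simp [h]

-- inserting a binary-keyed element into a 0-block ++ 1-block list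
lemma insertBy_block (x : List (String × Option String)) (A B : List (List (String × Option String)))
    (hA : ∀ a ∈ A, rowKey a = 0) (hB : ∀ b ∈ B, rowKey b = 1)
    (hx : rowKey x = 0 ∨ rowKey x = 1) :
    PySem.List.insertBy (fun a b => decide (rowKey a < rowKey b)) x (A ++ B) =
      if rowKey x = 0 then A ++ x :: B else (A ++ B) ++ [x] := by
  induction A with
  | nil =>
    simp only [List.nil_append]
    induction B with
    | nil => cases hx with | inl h => simp [PySem.List.insertBy, h] | inr h => simp [PySem.List.insertBy, h]
    | cons b bs ih =>
      have hb := hB b (by simp)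
      have hbs : ∀ y ∈ bs, rowKey y = 1 := fun y hy => hB y (by simp [hy])
      cases hx with
      | inl h => simp [PySem.List.insertBy, h, hb]
      | inr h => simp [PySem.List.insertBy, h, hb, ih hbs]
  | cons a as ih =>
    have ha := hA a (by simp)
    have has : ∀ y ∈ as, rowKey y = 0 := fun y hy => hA y (by simp [hy])
    have hxa : ¬ (rowKey x < rowKey a) := by omega
    cases hx with
    | inl h =>
      simp only [List.cons_append, PySem.List.insertBy, hxa]
      simp [ih has, h]
    | inr h =>
      simp only [List.cons_append, PySem.List.insertBy, hxa]
      simp [ih has, h]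

lemma foldl_insert_partition (xs A B : List (List (String × Option String)))
    (hA : ∀ a ∈ A, rowKey a = 0) (hB : ∀ b ∈ B, rowKey b = 1)
    (hxs : ∀ x ∈ xs, rowKey x = 0 ∨ rowKey x = 1) :
    xs.foldl (fun acc x => PySem.List.insertBy (fun a b => decide (rowKey a < rowKey b)) x acc) (A ++ B) =
      (A ++ xs.filter (fun x => rowKey x == 0)) ++ (B ++ xs.filter (fun x => !(rowKey x == 0))) := by
  induction xs generalizing A B with
  | nil => simp
  | cons x xs ih =>
    have hx := hxs x (by simp)
    have hxs' : ∀ y ∈ xs, rowKey y = 0 ∨ rowKey y = 1 := fun y hy => hxs y (by simp [hy])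
    simp only [List.foldl_cons, insertBy_block x A B hA hB hx]
    by_cases h0 : rowKey x = 0
    · have : A ++ x :: B = (A ++ [x]) ++ B := by simp
      rw [if_pos h0, this, ih (A ++ [x]) B
        (by intro a ha; rcases (List.mem_append.mp ha) with h | h
            · exact hA a h
            · simp at h; simp [h, h0]) hB hxs']
      simp [h0]
    · have h1 : rowKey x = 1 := hx.resolve_left h0
      have : (A ++ B) ++ [x] = A ++ (B ++ [x]) := by simp
      rw [if_neg h0, this, ih A (B ++ [x]) hA
        (by intro b hb; rcases (List.mem_append.mp hb) with h | h
            · exact hB b h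
            · simp at h; simp [h, h1]) hxs']
      simp [h0]

lemma rowsA_eq (departments : List (List (String × Option String))) :
    departments.foldl (fun rows d =>
      let head := pvOr (pvGet d "department_head") ""
      if head ≠ "" then
      rows ++ [[("department_id", pvGet d "department_id"),
          ("department_name", pvGet d "department_name"),
          ("department_head", some head),
          ("dean_flag", some (pvOr (pvGet d "dean_flag") "N"))]]
    else rows) [] =
    (departments.filter headOK).map mkRow := by
  have hfun : (fun (rows : List (List (String × Option String))) d =>
      let head := pvOr (pvGet d "department_head") ""
      if head ≠ "" then
        rows ++ [[("department_id", pvGet d "department_id"),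
          ("department_name", pvGet d "department_name"),
          ("department_head", some head),
          ("dean_flag", some (pvOr (pvGet d "dean_flag") "N"))]]
      else rows)
    = (fun rows d => if headOK d then rows ++ [mkRow d] else rows) := by
    funext rows d; simp [headOK, mkRow]
  rw [hfun, PySem.List.foldl_append_if, List.nil_append]

lemma altB_eq (departments : List (List (String × Option String)))
    (de ot : List (List (String × Option String))) :
    departments.foldl
      (fun (acc : List (List (String × Option String)) × List (List (String × Option String))) d =>
        let head := pvOr (pvGet d "department_head") ""
        if head = "" then acc
        else
          let row := [("department_id", pvGet d "department_id"),
          ("department_name", pvGet d "department_name"),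
          ("department_head", some head),
          ("dean_flag", some (pvOr (pvGet d "dean_flag") "N"))]
          if PySem.Str.upper (pvOr (pvGet d "dean_flag") "N") = "Y" then
            (acc.1 ++ [row], acc.2)
          else
            (acc.1, acc.2 ++ [row]))
      (de, ot) =
    (de ++ ((departments.filter headOK).filter isDean).map mkRow,
     ot ++ ((departments.filter headOK).filter (fun d => !isDean d)).map mkRow) := by
  induction departments generalizing de ot with
  | nil => simp
  | cons d ds ih =>
    by_cases hh : pvOr (pvGet d "department_head") "" = ""
    · have hOK : headOK d = false := by simp [headOK, hh]
      simp [List.foldl_cons, hh, ih, hOK]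
    · have hOK : headOK d = true := by simp [headOK, hh]
      by_cases hd : PySem.Str.upper (pvOr (pvGet d "dean_flag") "N") = "Y"
      · have hD : isDean d = true := by simp [isDean, hd]
        simp [List.foldl_cons, hh, hd, ih, hOK, hD, mkRow]
      · have hD : isDean d = false := by simp [isDean, hd]
        simp [List.foldl_cons, hh, hd, ih, hOK, hD, mkRow]

lemma filter_key_map (l : List (List (String × Option String))) :
    ((l.map mkRow).filter (fun x => rowKey x == 0) = (l.filter isDean).map mkRow) ∧
    ((l.map mkRow).filter (fun x => !(rowKey x == 0)) = (l.filter (fun d => !isDean d)).map mkRow) := by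
  constructor <;>
  · rw [List.filter_map]
    congr 1
    apply List.filter_congr
    intro d _
    rw [Function.comp_apply, rowKey_mkRow]
    by_cases h : isDean d <;> simp [h]

-- ===== VERDICT (by name: the statement is the Claim_ definition above) =====
theorem list_department_heads_spec : Claim_equal_list_department_heads := by
  intro departments _
  unfold Spec_list_department_heads list_department_heads list_department_heads_alt
  rw [rowsA_eq, altB_eq]
  rw [PySem.List.sorted_eq_foldl_insertBy]
  have h := foldl_insert_partition ((departments.filter headOK).map mkRow) [] []
    (by simp) (by simp)
    (by intro x hx; rcases List.mem_map.mp hx with ⟨d, _, rfl⟩; exact rowKey_binary d)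
  simp only [List.nil_append, List.append_nil] at h ⊢
  rw [h, (filter_key_map _).1, (filter_key_map _).2]
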